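-- pv_equiv track=rewrite | github.com/franflori/Datasciencie | basico/vsc/ejercicio14.py | fibonacciMayoresque
-- ===== SOURCE A (Python) =====
-- def fibonacciMayoresque(numero,mayores):
--     lista=[]
--     valor1=0
--     valor2=1
--     i=0
--
--     while i<numero:
--
--         valor1,valor2=valor2,valor1+valor2
--         if(valor2>mayores):
--             lista.append(valor2)
--             i+=1
--     return lista
-- ===== SOURCE B (Python) =====
-- def fibonacciMayoresque(numero, mayores):
--     # Different algorithm: locate the crossing index k (first Fibonacci index >= 2
--     # with F(k) > mayores) by exponential + binary search over fast-doubling fibpair,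
--     # jump directly to the LAST requested term F(k+numero-1) with fast doubling, and
--     # build the answer back-to-front by subtraction, reversing at the end.
--     if numero <= 0:
--         return []
--
--     def fibpair(n):
--         # (F(n), F(n+1)) by fast doubling
--         if n == 0:
--             return (0, 1)
--         a, b = fibpair(n // 2)
--         c = a * (2 * b - a)
--         d = a * a + b * b
--         return (c, d) if n % 2 == 0 else (d, c + d)
--
--     hi = 2
--     while fibpair(hi)[0] <= mayores:
--         hi *= 2
--     lo = 2
--     while lo < hi:
--         mid = (lo + hi) // 2
--         if mayores < fibpair(mid)[0]:
--             hi = mid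
--         else:
--             lo = mid + 1
--     x, y = fibpair(lo + numero - 1)
--     out = []
--     for _ in range(numero):
--         out.append(x)
--         x, y = y - x, x
--     out.reverse()
--     return out
-- ===== Notes on version B (the rewrite author's own statement) =====
-- stated objective: alternative
-- what changed: A's linear scan of the Fibonacci recurrence with a conditionally-incremented counter is replaced by fast-doubling Fibonacci pairs: exponential + binary search locates the first index with F(k) > mayores, a fast-doubling jump computes the last requested pair directly, and the list is built back-to-front by subtraction and reversed.
import Mathlib
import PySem

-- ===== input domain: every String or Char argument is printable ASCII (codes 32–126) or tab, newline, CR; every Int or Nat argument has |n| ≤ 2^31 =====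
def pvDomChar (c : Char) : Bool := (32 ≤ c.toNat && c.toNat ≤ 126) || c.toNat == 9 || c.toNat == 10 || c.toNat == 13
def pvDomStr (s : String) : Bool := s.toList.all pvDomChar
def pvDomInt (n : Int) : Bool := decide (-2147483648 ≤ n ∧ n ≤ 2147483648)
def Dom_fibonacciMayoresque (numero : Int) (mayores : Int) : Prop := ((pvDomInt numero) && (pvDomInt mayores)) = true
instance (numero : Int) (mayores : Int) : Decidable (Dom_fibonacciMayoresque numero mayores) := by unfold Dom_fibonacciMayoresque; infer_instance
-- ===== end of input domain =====

-- B replaces A's linear scan of the Fibonacci recurrence by exponential + binary search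
-- over fast-doubling pairs for the crossing index, a fast-doubling jump to the LAST
-- requested term, and a backward build by subtraction (objective: alternative).

-- ===== PORT A =====
-- A's while-loop; the fuel is only a totality bound (the loop performs at most
-- numero.toNat appends plus at most mayores.toNat + 2 skips).
def loopA (numero mayores : Int) : Nat → Int → Int → Int → List Int → List Int
  | 0, _, _, _, acc => acc
  | f + 1, v1, v2, i, acc =>
    if i < numero then
      -- valor1, valor2 = valor2, valor1 + valor2
      if v1 + v2 > mayores then
        loopA numero mayores f v2 (v1 + v2) (i + 1) (acc ++ [v1 + v2])
      else
        loopA numero mayores f v2 (v1 + v2) i acc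
    else acc

def fibonacciMayoresque (numero : Int) (mayores : Int) : List Int :=
  loopA numero mayores (numero.toNat + mayores.toNat + 2) 0 1 0 []

-- ===== PORT B =====
-- Source B's fibpair(n) = (F(n), F(n+1)) by fast doubling; n is a nonnegative Python int,
-- represented as Nat (// 2 and % 2 on nonnegative ints agree with Nat's / and %).
def fibpair (n : Nat) : Int × Int :=
  if h : n = 0 then (0, 1)
  else
    let p := fibpair (n / 2)
    let c := p.1 * (2 * p.2 - p.1)
    let d := p.1 * p.1 + p.2 * p.2
    if n % 2 == 0 then (c, d) else (d, c + d)
  termination_by n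
  decreasing_by exact Nat.div_lt_self (Nat.pos_of_ne_zero h) one_lt_two

-- Source B's `while fibpair(hi)[0] <= mayores: hi *= 2` (fuel is a totality bound only)
def expLoop (mayores : Int) : Nat → Nat → Nat
  | 0, hi => hi
  | f + 1, hi => if (fibpair hi).1 ≤ mayores then expLoop mayores f (hi * 2) else hi

-- Source B's binary-search while loop (fuel is a totality bound only)
def bsLoop (mayores : Int) : Nat → Nat → Nat → Nat
  | 0, lo, _ => lo
  | f + 1, lo, hi =>
    if lo < hi then
      let mid := (lo + hi) / 2
      if mayores < (fibpair mid).1 then bsLoop mayores f lo mid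
      else bsLoop mayores f (mid + 1) hi
    else lo

-- Source B's `for _ in range(numero): out.append(x); x, y = y - x, x`
def backLoop : Nat → Int → Int → List Int → List Int
  | 0, _, _, acc => acc
  | n + 1, x, y, acc => backLoop n (y - x) x (acc ++ [x])

def fibonacciMayoresque_alt (numero : Int) (mayores : Int) : List Int :=
  if numero ≤ 0 then []
  else
    let hi := expLoop mayores 64 2
    let k := bsLoop mayores hi 2 hi
    let p := fibpair (k + (numero.toNat - 1))
    (backLoop numero.toNat p.1 p.2 []).reverse

-- ===== PRECONDITION & SPEC =====
def Spec_fibonacciMayoresque (numero : Int) (mayores : Int) (out : List Int) : Prop := out = fibonacciMayoresque_alt numero mayores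
instance (numero : Int) (mayores : Int) (out : List Int) : Decidable (Spec_fibonacciMayoresque numero mayores out) := by unfold Spec_fibonacciMayoresque; infer_instance

-- ===== CLAIM (what is proved, stated in full; the proofs are below) =====
def Claim_equal_fibonacciMayoresque : Prop := ∀ (numero : Int) (mayores : Int), Dom_fibonacciMayoresque numero mayores → Spec_fibonacciMayoresque numero mayores (fibonacciMayoresque numero mayores)

-- ===== LEMMAS AND PROOFS =====

-- the crossing index: least m ≥ 2 with F(m) > mayores
theorem exK (mayores : Int) : ∃ m, 2 ≤ m ∧ mayores < (Nat.fib m : Int) := by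
  refine ⟨mayores.toNat + 5, by omega, ?_⟩
  have h1 : (mayores.toNat + 5 : ℕ) ≤ Nat.fib (mayores.toNat + 5) := Nat.le_fib_self (by omega)
  have h2 : mayores ≤ (mayores.toNat : Int) := Int.self_le_toNat mayores
  have h3 : ((mayores.toNat + 5 : ℕ) : Int) ≤ (Nat.fib (mayores.toNat + 5) : Int) := by
    exact_mod_cast h1
  push_cast at h3 ⊢
  omega

def fibK (mayores : Int) : Nat := Nat.find (exK mayores)

theorem fibK_ge2 (mayores : Int) : 2 ≤ fibK mayores := (Nat.find_spec (exK mayores)).1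

theorem fibK_gt (mayores : Int) : mayores < (Nat.fib (fibK mayores) : Int) :=
  (Nat.find_spec (exK mayores)).2

theorem fibK_min (mayores : Int) {m : Nat} (h2 : 2 ≤ m) (hm : m < fibK mayores) :
    (Nat.fib m : Int) ≤ mayores := by
  have := Nat.find_min (exK mayores) hm
  push Not at this
  exact this h2

theorem fibK_le (mayores : Int) : fibK mayores ≤ mayores.toNat + 4 := by
  by_cases h : mayores < 1
  · have : fibK mayores ≤ 2 := Nat.find_min' (exK mayores) ⟨le_refl 2, by simpa using h⟩
    omega
  · push Not at h
    apply Nat.find_min' (exK mayores)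
    refine ⟨by omega, ?_⟩
    have h1 : (mayores.toNat + 4 : ℕ) ≤ Nat.fib (mayores.toNat + 4) := Nat.le_fib_self (by omega)
    have h2 : mayores ≤ (mayores.toNat : Int) := Int.self_le_toNat mayores
    have h3 : ((mayores.toNat + 4 : ℕ) : Int) ≤ (Nat.fib (mayores.toNat + 4) : Int) := by
      exact_mod_cast h1
    push_cast at h3
    omega

theorem fib_cast_add (n : Nat) :
    (Nat.fib n : Int) + (Nat.fib (n + 1) : Int) = (Nat.fib (n + 2) : Int) := by
  rw [Nat.fib_add_two]; push_cast; ring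

-- A's loop once past the crossing: every iteration appends
theorem loopA_take (numero mayores : Int) :
    ∀ (n fuel j : Nat) (i : Int) (acc : List Int),
      (numero - i).toNat = n → mayores < (Nat.fib (j + 2) : Int) → n ≤ fuel →
      loopA numero mayores fuel (Nat.fib j) (Nat.fib (j + 1)) i acc
        = acc ++ (List.range n).map (fun t => (Nat.fib (j + 2 + t) : Int)) := by
  intro n
  induction n with
  | zero =>
    intro fuel j i acc hn _ _
    have hni : ¬ i < numero := by omega
    cases fuel with
    | zero => simp [loopA]
    | succ f => simp [loopA, hni]
  | succ n ih =>
    intro fuel j i acc hn hgt hf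
    have hi : i < numero := by omega
    cases fuel with
    | zero => omega
    | succ f =>
      have hv := fib_cast_add j
      have h12 : j + 1 + 1 = j + 2 := by omega
      have hv2 : (Nat.fib j : Int) + Nat.fib (j + 1) = (Nat.fib (j + 1 + 1) : Int) := by
        rw [h12]; exact hv
      simp only [loopA]
      rw [if_pos hi, if_pos (by omega : (Nat.fib j : Int) + Nat.fib (j + 1) > mayores), hv2]
      have hgt2 : mayores < (Nat.fib (j + 1 + 2) : Int) :=
        lt_of_lt_of_le hgt (by exact_mod_cast Nat.fib_mono (by omega))
      rw [ih f (j + 1) (i + 1) (acc ++ [(Nat.fib (j + 1 + 1) : Int)]) (by omega) hgt2 (by omega)]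
      have hsplit : (List.range (n + 1)).map (fun t => (Nat.fib (j + 2 + t) : Int))
          = (Nat.fib (j + 2) : Int) :: (List.range n).map (fun t => (Nat.fib (j + 1 + 2 + t) : Int)) := by
        rw [List.range_succ_eq_map, List.map_cons, List.map_map]
        congr 1
        apply List.map_congr_left
        intro a _
        show (Nat.fib (j + 2 + (a + 1)) : Int) = (Nat.fib (j + 1 + 2 + a) : Int)
        exact_mod_cast congrArg Nat.fib (by omega : j + 2 + (a + 1) = j + 1 + 2 + a)
      rw [hsplit, List.append_assoc, List.singleton_append, h12]

-- A's loop before the crossing: skips, in step with the crossing index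
theorem loopA_skip (numero mayores : Int) :
    ∀ (fuel j : Nat) (i : Int) (acc : List Int),
      i < numero → j + 2 ≤ fibK mayores →
      (fibK mayores - 2 - j) + (numero - i).toNat ≤ fuel →
      loopA numero mayores fuel (Nat.fib j) (Nat.fib (j + 1)) i acc
        = acc ++ (List.range (numero - i).toNat).map (fun t => (Nat.fib (fibK mayores + t) : Int)) := by
  intro fuel
  induction fuel with
  | zero =>
    intro j i acc hi _ hf
    have : 1 ≤ (numero - i).toNat := by omega
    omega
  | succ f ih =>
    intro j i acc hi hK hf
    by_cases hEq : j + 2 = fibK mayores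
    · have hgt : mayores < (Nat.fib (j + 2) : Int) := by rw [hEq]; exact fibK_gt mayores
      rw [loopA_take numero mayores (numero - i).toNat (f + 1) j i acc rfl hgt (by omega)]
      rw [hEq]
    · have hlt : j + 2 < fibK mayores := by omega
      have hle : (Nat.fib (j + 2) : Int) ≤ mayores := fibK_min mayores (by omega) hlt
      have hv := fib_cast_add j
      have hv2 : (Nat.fib j : Int) + Nat.fib (j + 1) = (Nat.fib (j + 1 + 1) : Int) := by
        rw [show j + 1 + 1 = j + 2 from by omega]; exact hv
      simp only [loopA]
      rw [if_pos hi, if_neg (by omega : ¬ (Nat.fib j : Int) + Nat.fib (j + 1) > mayores), hv2]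
      exact ih (j + 1) i acc hi (by omega) (by omega)

-- fast doubling computes Fibonacci pairs
theorem fibpair_eq : ∀ n : Nat, fibpair n = ((Nat.fib n : Int), (Nat.fib (n + 1) : Int)) := by
  intro n
  induction n using Nat.strong_induction_on with
  | _ n ih =>
    rw [fibpair]
    by_cases h : n = 0
    · subst h; simp
    · rw [dif_neg h]
      have hrec := ih (n / 2) (Nat.div_lt_self (Nat.pos_of_ne_zero h) one_lt_two)
      rw [hrec]
      set m := n / 2 with hm
      have hle : Nat.fib m ≤ 2 * Nat.fib (m + 1) :=
        le_trans Nat.fib_le_fib_succ (by omega)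
      have hc : (Nat.fib m : Int) * (2 * (Nat.fib (m + 1) : Int) - Nat.fib m)
          = (Nat.fib (2 * m) : Int) := by
        rw [Nat.fib_two_mul, Nat.cast_mul, Nat.cast_sub hle]
        push_cast; ring
      have hd : (Nat.fib m : Int) * Nat.fib m + (Nat.fib (m + 1) : Int) * Nat.fib (m + 1)
          = (Nat.fib (2 * m + 1) : Int) := by
        rw [Nat.fib_two_mul_add_one]
        push_cast; ring
      by_cases hpar : n % 2 = 0
      · have h2m : 2 * m = n := by omega
        simp only [hpar, beq_self_eq_true, if_true]
        rw [hc, hd, h2m]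
      · have h2m : 2 * m + 1 = n := by omega
        have hne : (n % 2 == 0) = false := by
          simp [Nat.mod_two_ne_zero.mp hpar]
        simp only [hne, Bool.false_eq_true, if_false]
        rw [hc, hd]
        have hsum : (Nat.fib (2 * m) : Int) + Nat.fib (2 * m + 1) = (Nat.fib (2 * m + 2) : Int) :=
          fib_cast_add (2 * m)
        rw [hsum, h2m, show 2 * m + 2 = n + 1 by omega]

-- the exponential search reaches an index past the crossing
theorem expLoop_spec (mayores : Int) :
    ∀ (f hi : Nat), 2 ≤ hi → mayores < (Nat.fib (hi * 2 ^ f) : Int) →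
      2 ≤ expLoop mayores f hi ∧ mayores < (Nat.fib (expLoop mayores f hi) : Int) := by
  intro f
  induction f with
  | zero =>
    intro hi h2 hlt
    simpa [expLoop] using ⟨h2, by simpa using hlt⟩
  | succ f ih =>
    intro hi h2 hlt
    simp only [expLoop, fibpair_eq]
    by_cases hc : (Nat.fib hi : Int) ≤ mayores
    · rw [if_pos hc]
      exact ih (hi * 2) (by omega) (by rw [show hi * 2 * 2 ^ f = hi * 2 ^ (f + 1) by ring]; exact hlt)
    · rw [if_neg hc]
      exact ⟨h2, by omega⟩

-- the binary search returns exactly the crossing index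
theorem bsLoop_spec (mayores : Int) :
    ∀ (f lo hi : Nat), hi - lo ≤ f → 2 ≤ lo → lo ≤ fibK mayores → fibK mayores ≤ hi →
      bsLoop mayores f lo hi = fibK mayores := by
  intro f
  induction f with
  | zero =>
    intro lo hi hf h2 hloK hKhi
    simp only [bsLoop]
    omega
  | succ f ih =>
    intro lo hi hf h2 hloK hKhi
    simp only [bsLoop]
    by_cases hlt : lo < hi
    · rw [if_pos hlt]
      simp only [fibpair_eq]
      by_cases hc : mayores < (Nat.fib ((lo + hi) / 2) : Int)
      · rw [if_pos hc]
        have hKmid : fibK mayores ≤ (lo + hi) / 2 := by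
          by_contra hmid
          push Not at hmid
          exact absurd hc (not_lt.mpr (fibK_min mayores (by omega) hmid))
        exact ih lo ((lo + hi) / 2) (by omega) h2 hloK hKmid
      · rw [if_neg hc]
        push Not at hc
        have hmidK : (lo + hi) / 2 + 1 ≤ fibK mayores := by
          by_contra hmid
          push Not at hmid
          have : (Nat.fib (fibK mayores) : Int) ≤ (Nat.fib ((lo + hi) / 2) : Int) := by
            exact_mod_cast Nat.fib_mono (by omega)
          have := fibK_gt mayores
          omega
        exact ih ((lo + hi) / 2 + 1) hi (by omega) (by omega) hmidK hKhi
    · rw [if_neg hlt]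
      omega

-- the backward subtraction loop lists consecutive Fibonacci values in descending order
theorem backLoop_eq :
    ∀ (n m : Nat) (acc : List Int), n ≤ m + 1 →
      backLoop n (Nat.fib m) (Nat.fib (m + 1)) acc
        = acc ++ (List.range n).map (fun t => (Nat.fib (m - t) : Int)) := by
  intro n
  induction n with
  | zero => intro m acc _; simp [backLoop]
  | succ n ih =>
    intro m acc hnm
    cases m with
    | zero =>
      have hn0 : n = 0 := by omega
      subst hn0
      simp [backLoop]
    | succ m' =>
      have hsub : (Nat.fib (m' + 1 + 1) : Int) - Nat.fib (m' + 1) = (Nat.fib m' : Int) := by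
        have hv := fib_cast_add m'
        rw [show m' + 1 + 1 = m' + 2 from by omega]
        omega
      simp only [backLoop]
      rw [hsub]
      rw [ih m' (acc ++ [(Nat.fib (m' + 1) : Int)]) (by omega)]
      have hsplit : (List.range (n + 1)).map (fun t => (Nat.fib (m' + 1 - t) : Int))
          = (Nat.fib (m' + 1) : Int) :: (List.range n).map (fun t => (Nat.fib (m' - t) : Int)) := by
        rw [List.range_succ_eq_map, List.map_cons, List.map_map]
        congr 1
        apply List.map_congr_left
        intro a _
        show (Nat.fib (m' + 1 - (a + 1)) : Int) = (Nat.fib (m' - a) : Int)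
        exact_mod_cast congrArg Nat.fib (by omega : m' + 1 - (a + 1) = m' - a)
      rw [hsplit, List.append_assoc, List.singleton_append]

-- A's loop is a no-op once i ≥ numero (covers numero ≤ 0)
theorem loopA_done (numero mayores : Int) (f : Nat) (v1 v2 i : Int) (acc : List Int)
    (h : ¬ i < numero) : loopA numero mayores f v1 v2 i acc = acc := by
  cases f with
  | zero => rfl
  | succ f => simp [loopA, h]

theorem fib47_big : (2147483648 : Int) < (Nat.fib 47 : Int) := by
  have : Nat.fib 47 = 2971215073 := by rfl
  rw [this]
  norm_num

-- ===== VERDICT (by name: the statement is the Claim_ definition above) =====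
theorem fibonacciMayoresque_spec : Claim_equal_fibonacciMayoresque := by
  intro numero mayores hDom
  have hmay : mayores ≤ 2147483648 := by
    unfold Dom_fibonacciMayoresque pvDomInt at hDom
    simp only [Bool.and_eq_true, decide_eq_true_eq] at hDom
    omega
  unfold Spec_fibonacciMayoresque fibonacciMayoresque fibonacciMayoresque_alt
  by_cases hn : numero ≤ 0
  · rw [if_pos hn]
    exact loopA_done numero mayores _ 0 1 0 [] (by omega)
  · rw [if_neg hn]
    dsimp only
    push Not at hn
    -- A's side: the list of fib (fibK + t)
    have hA : loopA numero mayores (numero.toNat + mayores.toNat + 2) 0 1 0 []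
        = [] ++ (List.range numero.toNat).map
            (fun t => (Nat.fib (fibK mayores + t) : Int)) := by
      have h0 : (0 : Int) = (Nat.fib 0 : Int) := by simp
      have h1 : (1 : Int) = (Nat.fib (0 + 1) : Int) := by simp
      rw [h0, h1]
      have := loopA_skip numero mayores (numero.toNat + mayores.toNat + 2) 0 0 []
        (by omega) (fibK_ge2 mayores) (by have := fibK_le mayores; omega)
      rwa [Int.sub_zero] at this
    rw [hA]
    -- B's side
    have hexp := expLoop_spec mayores 64 2 (by omega) (by
      calc mayores ≤ 2147483648 := hmay
        _ < (Nat.fib 47 : Int) := fib47_big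
        _ ≤ (Nat.fib (2 * 2 ^ 64) : Int) := by
            exact_mod_cast Nat.fib_mono (by norm_num))
    have hKH : fibK mayores ≤ expLoop mayores 64 2 :=
      Nat.find_min' (exK mayores) ⟨hexp.1, hexp.2⟩
    have hbs : bsLoop mayores (expLoop mayores 64 2) 2 (expLoop mayores 64 2) = fibK mayores :=
      bsLoop_spec mayores (expLoop mayores 64 2) 2 (expLoop mayores 64 2)
        (by omega) (by omega) (fibK_ge2 mayores) hKH
    rw [hbs, fibpair_eq (fibK mayores + (numero.toNat - 1))]
    rw [backLoop_eq numero.toNat (fibK mayores + (numero.toNat - 1)) [] (by omega)]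
    simp only [List.nil_append]
    -- reverse of the descending list = the ascending list
    apply List.ext_getElem
    · simp
    · intro i h1 h2
      simp only [List.getElem_reverse, List.getElem_map, List.getElem_range,
        List.length_map, List.length_range]
      have hi : i < numero.toNat := by simpa using h2
      have h1n : 1 ≤ numero.toNat := by omega
      congr 2
      omega
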